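-- pv_equiv track=rewrite | github.com/diogoMealha/chess.com_board | src/board_identifier.py | simplify_fen
-- ===== SOURCE A (Python) =====
-- def simplify_fen(fen_unsiplified):
--     fen_simplified = ""
--     count = 0
--     past_letter_dot = False
--     for letter in fen_unsiplified:
--         if letter == '.':
--             count += 1
--             if not past_letter_dot:
--                 past_letter_dot = True
--         else:
--             if past_letter_dot:
--                 past_letter_dot = False
--                 fen_simplified += str(count)
--                 count = 0
--             fen_simplified += letter
--     return fen_simplified[:-1]
-- ===== SOURCE B (Python) =====
-- def simplify_fen(fen_unsiplified):
--     segs = fen_unsiplified.split('.')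
--     parts = [segs[0]]
--     run = 0
--     for seg in segs[1:]:
--         run += 1
--         if seg:
--             parts.append(str(run))
--             parts.append(seg)
--             run = 0
--     return ''.join(parts)[:-1]
-- ===== Notes on version B (the rewrite author's own statement) =====
-- stated objective: simpler
-- what changed: Replaces A's per-character state machine (count and past_letter_dot flags with manual flushing and quadratic string concatenation) by one str.split call on the dot character: run lengths are read off as gaps between split segments in a single simple fold over the segments, and trailing dot-runs disappear without any flag logic.
import Mathlib
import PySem

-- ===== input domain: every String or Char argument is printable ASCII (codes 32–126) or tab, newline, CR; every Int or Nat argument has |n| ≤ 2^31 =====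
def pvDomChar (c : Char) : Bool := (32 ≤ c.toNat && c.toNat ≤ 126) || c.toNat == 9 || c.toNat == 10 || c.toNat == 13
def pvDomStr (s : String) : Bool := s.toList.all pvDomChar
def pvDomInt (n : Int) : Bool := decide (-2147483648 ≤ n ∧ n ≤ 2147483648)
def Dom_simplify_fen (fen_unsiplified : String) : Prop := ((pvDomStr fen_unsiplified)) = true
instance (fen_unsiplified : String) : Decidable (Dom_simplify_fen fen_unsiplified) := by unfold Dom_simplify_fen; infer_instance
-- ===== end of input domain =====

-- B compresses dot-runs by splitting on '.' once instead of A's per-character state machine; objective: simpler decomposition, same values everywhere (both drop a trailing dot-run and the final character).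

-- ===== PORT A =====
-- loop body of A, with state (fen_simplified, count, past_letter_dot)
def pvStepA (st : List Char × Int × Bool) (letter : Char) : List Char × Int × Bool :=
  if letter = '.' then
    (st.1, st.2.1 + 1, if st.2.2 = false then true else st.2.2)
  else
    if st.2.2 then (st.1 ++ PySem.Int.toChars st.2.1 ++ [letter], 0, false)
    else (st.1 ++ [letter], st.2.1, st.2.2)

def simplify_fen (fen_unsiplified : String) : String :=
  let r := fen_unsiplified.toList.foldl pvStepA ([], 0, false)
  String.ofList (PySem.List.slice r.1 none (some (-1)))

-- ===== PORT B =====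
-- loop body of B, with state (parts, run)
def pvStepB (st : List (List Char) × Int) (seg : List Char) : List (List Char) × Int :=
  let run := st.2 + 1
  if seg ≠ [] then (st.1 ++ [PySem.Int.toChars run, seg], 0) else (st.1, run)

def simplify_fen_alt (fen_unsiplified : String) : String :=
  let segs := PySem.Chars.splitOn fen_unsiplified.toList ['.']
  let r := (PySem.List.slice segs (some 1) none).foldl pvStepB ([PySem.List.pyGetD segs 0 []], 0)
  String.ofList (PySem.List.slice (PySem.Chars.join [] r.1) none (some (-1)))

-- ===== PRECONDITION & SPEC =====
def Spec_simplify_fen (fen_unsiplified : String) (out : String) : Prop := out = simplify_fen_alt fen_unsiplified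
instance (fen_unsiplified : String) (out : String) : Decidable (Spec_simplify_fen fen_unsiplified out) := by unfold Spec_simplify_fen; infer_instance

-- ===== CLAIM (what is proved, stated in full; the proofs are below) =====
def Claim_equal_simplify_fen : Prop := ∀ (fen_unsiplified : String), Dom_simplify_fen fen_unsiplified → Spec_simplify_fen fen_unsiplified (simplify_fen fen_unsiplified)

-- ===== LEMMAS AND PROOFS =====

-- functional characterisation of str.split('.')
def pvSplit (pre : List Char) : List Char → List (List Char)
  | [] => [pre]
  | c :: rest => if c = '.' then pre :: pvSplit [] rest else pvSplit (pre ++ [c]) rest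

-- what A's loop appends when entered with a pending dot-count n
def pvF : List Char → Int → List Char
  | [], _ => []
  | c :: rest, n =>
      if c = '.' then pvF rest (n + 1)
      else (if n ≠ 0 then PySem.Int.toChars n else []) ++ c :: pvF rest 0

-- what B's loop appends to parts, given the pending run counter
def pvH : List (List Char) → Int → List (List Char)
  | [], _ => []
  | seg :: rest, run =>
      if seg ≠ [] then [PySem.Int.toChars (run + 1), seg] ++ pvH rest 0 else pvH rest (run + 1)

theorem pvLemA (l : List Char) : ∀ (acc : List Char) (n : Int) (b : Bool), 0 ≤ n →
    b = decide (n ≠ 0) →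
    (l.foldl pvStepA (acc, n, b)).1 = acc ++ pvF l n := by
  induction l with
  | nil => intro acc n b _ _; simp [pvF]
  | cons c rest ih =>
    intro acc n b hn hb
    by_cases hc : c = '.'
    · have h1 : (0:Int) ≤ n + 1 := by omega
      have hb' : (if b = false then true else b) = decide (n + 1 ≠ 0) := by
        by_cases h0 : n = 0 <;> simp [hb, h0] <;> omega
      rw [List.foldl_cons]
      have e : pvStepA (acc, n, b) c = (acc, n + 1, decide (n + 1 ≠ 0)) := by
        simp [pvStepA, hc, hb']
      rw [e, ih acc (n + 1) _ h1 rfl]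
      simp [pvF, hc]
    · subst hb
      by_cases h0 : n = 0
      · simpa [List.foldl_cons, pvStepA, hc, h0, pvF] using ih (acc ++ [c]) 0 _ le_rfl (by simp)
      · simpa [List.foldl_cons, pvStepA, hc, h0, pvF, List.append_assoc] using
          ih (acc ++ PySem.Int.toChars n ++ [c]) 0 _ le_rfl (by simp)

theorem pvLemB (segs : List (List Char)) : ∀ (parts : List (List Char)) (run : Int),
    (segs.foldl pvStepB (parts, run)).1 = parts ++ pvH segs run := by
  induction segs with
  | nil => intro parts run; simp [pvH]
  | cons seg rest ih =>
    intro parts run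
    by_cases hs : seg = []
    · simp [List.foldl_cons, pvStepB, hs, pvH, ih]
    · simp [List.foldl_cons, pvStepB, hs, pvH, ih, List.append_assoc]

theorem pvGoSpec (l : List Char) : ∀ (fuel : Nat) (cur : List Char) (acc : List (List Char)),
    l.length < fuel →
    PySem.Chars.splitOn.go ['.'] fuel l cur acc = acc.reverse ++ pvSplit cur.reverse l := by
  induction l with
  | nil =>
    intro fuel cur acc h
    cases fuel with
    | zero => omega
    | succ f => simp [PySem.Chars.splitOn.go, pvSplit]
  | cons c rest ih =>
    intro fuel cur acc h
    cases fuel with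
    | zero => simp at h
    | succ f =>
      by_cases hc : c = '.'
      · have : PySem.Chars.splitOn.go ['.'] (f+1) (c :: rest) cur acc =
            PySem.Chars.splitOn.go ['.'] f rest [] (cur.reverse :: acc) := by
          simp [PySem.Chars.splitOn.go, hc, List.isPrefixOf]
        rw [this, ih f [] (cur.reverse :: acc) (by simp at h ⊢; omega)]
        simp [pvSplit, hc]
      · have hc2 : ¬ '.' = c := fun hx => hc hx.symm
        have : PySem.Chars.splitOn.go ['.'] (f+1) (c :: rest) cur acc =
            PySem.Chars.splitOn.go ['.'] f rest (c :: cur) acc := by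
          simp [PySem.Chars.splitOn.go, hc2, List.isPrefixOf]
        rw [this, ih f (c :: cur) acc (by simp at h ⊢; omega)]
        simp [pvSplit, hc]

theorem pvSplitOn_eq (l : List Char) : PySem.Chars.splitOn l ['.'] = pvSplit [] l := by
  unfold PySem.Chars.splitOn
  rw [pvGoSpec l (l.length + 1) [] [] (by omega)]
  simp

theorem pvJoinNil (l : List (List Char)) : PySem.Chars.join [] l = l.flatten := by
  induction l with
  | nil => simp [PySem.Chars.join_nil]
  | cons x rest ih =>
    cases rest with
    | nil => simp [PySem.Chars.join_singleton]
    | cons y t => rw [PySem.Chars.join_cons_cons]; simp [ih]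

-- joint invariant: flattening pvH of a split equals pvF with the matching pending count
theorem pvQ (cs : List Char) :
    (∀ n : Int, 0 ≤ n → (pvH (pvSplit [] cs) n).flatten = pvF cs (n + 1)) ∧
    (∀ (pre : List Char) (n : Int), 0 ≤ n → pre ≠ [] →
      (pvH (pvSplit pre cs) n).flatten = PySem.Int.toChars (n + 1) ++ pre ++ pvF cs 0) := by
  induction cs with
  | nil =>
    constructor
    · intro n hn; simp [pvSplit, pvH, pvF]
    · intro pre n hn hpre; simp [pvSplit, pvH, pvF, hpre]
  | cons c rest ih =>
    obtain ⟨ih0, ih1⟩ := ih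
    constructor
    · intro n hn
      by_cases hc : c = '.'
      · simp [pvSplit, hc, pvH, pvF, ih0 (n+1) (by omega), add_assoc]
      · have := ih1 [c] n hn (by simp)
        have hne : n + 1 ≠ 0 := by omega
        simp [pvSplit, hc, pvF, hne] at this ⊢
        simpa using this
    · intro pre n hn hpre
      by_cases hc : c = '.'
      · simp [pvSplit, hc, pvH, hpre, pvF, ih0 0 le_rfl, List.append_assoc]
      · have := ih1 (pre ++ [c]) n hn (by simp)
        simp [pvSplit, hc, pvF] at this ⊢
        simp [this]

theorem pvG' (cs : List Char) : ∀ (pre : List Char),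
    (pvSplit pre cs).getD 0 [] ++ (pvH ((pvSplit pre cs).drop 1) 0).flatten =
      pre ++ pvF cs 0 := by
  induction cs with
  | nil => intro pre; simp [pvSplit, pvH, pvF]
  | cons c rest ih =>
    intro pre
    by_cases hc : c = '.'
    · simp [pvSplit, hc, pvF, (pvQ rest).1 0 le_rfl]
    · have := ih (pre ++ [c])
      simp [pvSplit, hc, pvF] at this ⊢
      simp [this]

-- ===== VERDICT (by name: the statement is the Claim_ definition above) =====
theorem simplify_fen_spec : Claim_equal_simplify_fen := by
  intro fen _
  unfold Spec_simplify_fen simplify_fen simplify_fen_alt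
  dsimp only
  rw [pvLemA fen.toList [] 0 false le_rfl (by decide), pvSplitOn_eq,
      PySem.List.slice_from (a := 1) (pvSplit [] fen.toList) (by norm_num),
      pvLemB, pvJoinNil, PySem.List.pyGetD_zero]
  have key : (pvSplit [] fen.toList)[0]?.getD [] ++
      (pvH (pvSplit [] fen.toList).tail 0).flatten = pvF fen.toList 0 := by
    simpa [List.getD, List.drop_one] using pvG' fen.toList []
  simp [key]
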